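-- pv_equiv track=rewrite | github.com/neel3o115/cf-archives | strings(leetcode)/2425.py | frequency_array
-- ===== SOURCE A (Python) =====
-- def frequency_array(arr, lis):
--     freq = {}
--     for num in arr:
--         if num in freq:
--             freq[num] += len((lis))
--         else:
--             freq[num] = len((lis))
--
--     for num in lis:
--         if num in freq:
--             freq[num] += len(arr)
--         else:
--             freq[num] = len(arr)
--     return freq
-- ===== SOURCE B (Python) =====
-- def frequency_array(arr, lis):
--     n, m = len(arr), len(lis)
--     ca = {}
--     for x in arr:
--         ca[x] = ca.get(x, 0) + 1
--     cl = {}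
--     for x in lis:
--         cl[x] = cl.get(x, 0) + 1
--     freq = {}
--     for x, c in ca.items():
--         freq[x] = c * m
--     for x, c in cl.items():
--         freq[x] = freq.get(x, 0) + c * n
--     return freq
-- ===== Notes on version B (the rewrite author's own statement) =====
-- stated objective: alternative
-- what changed: Instead of A's per-occurrence accumulation (adding len(other) into the dict at each element), B first counts occurrences of each list into plain count dicts and then builds freq in one pass over the distinct keys by the closed form count*len(other), adding the second counter via get-default.
import Mathlib
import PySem

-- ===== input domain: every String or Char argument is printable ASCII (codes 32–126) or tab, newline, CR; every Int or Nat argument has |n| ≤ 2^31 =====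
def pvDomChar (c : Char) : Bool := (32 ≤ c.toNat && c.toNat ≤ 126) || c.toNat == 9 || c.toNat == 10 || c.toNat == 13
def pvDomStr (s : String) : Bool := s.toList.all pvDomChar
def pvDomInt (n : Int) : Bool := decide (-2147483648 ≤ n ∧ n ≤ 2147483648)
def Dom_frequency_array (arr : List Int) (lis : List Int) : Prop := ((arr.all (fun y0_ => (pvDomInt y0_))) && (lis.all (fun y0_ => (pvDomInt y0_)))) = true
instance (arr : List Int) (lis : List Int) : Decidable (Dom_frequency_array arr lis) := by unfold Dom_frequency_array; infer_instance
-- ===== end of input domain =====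

-- B counts each list into a dict first and then builds freq over the distinct keys by
-- count*len(other), instead of A's per-occurrence accumulation (alternative decomposition).

-- ===== PORT A =====
def frequency_array (arr : List Int) (lis : List Int) : List (Int × Int) :=
  let freq : PySem.Dict Int Int :=
    arr.foldl (fun freq num =>
      if freq.contains num then freq.modify num 0 (fun v => v + (lis.length : Int))
      else freq.insert num (lis.length : Int)) PySem.Dict.empty
  let freq : PySem.Dict Int Int :=
    lis.foldl (fun freq num =>
      if freq.contains num then freq.modify num 0 (fun v => v + (arr.length : Int))
      else freq.insert num (arr.length : Int)) freq
  freq.items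

-- ===== PORT B =====
def frequency_array_alt (arr : List Int) (lis : List Int) : List (Int × Int) :=
  let n : Int := arr.length
  let m : Int := lis.length
  let ca : PySem.Dict Int Int :=
    arr.foldl (fun d x => d.insert x (d.getD x 0 + 1)) PySem.Dict.empty
  let cl : PySem.Dict Int Int :=
    lis.foldl (fun d x => d.insert x (d.getD x 0 + 1)) PySem.Dict.empty
  let freq : PySem.Dict Int Int :=
    ca.items.foldl (fun d p => d.insert p.1 (p.2 * m)) PySem.Dict.empty
  let freq : PySem.Dict Int Int :=
    cl.items.foldl (fun d p => d.insert p.1 (d.getD p.1 0 + p.2 * n)) freq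
  freq.items

-- ===== PRECONDITION & SPEC =====
def Spec_frequency_array (arr : List Int) (lis : List Int) (out : List (Int × Int)) : Prop := out = frequency_array_alt arr lis
instance (arr : List Int) (lis : List Int) (out : List (Int × Int)) : Decidable (Spec_frequency_array arr lis out) := by unfold Spec_frequency_array; infer_instance

-- ===== CLAIM (what is proved, stated in full; the proofs are below) =====
def Claim_equal_frequency_array : Prop := ∀ (arr : List Int) (lis : List Int), Dom_frequency_array arr lis → Spec_frequency_array arr lis (frequency_array arr lis)

-- ===== LEMMAS AND PROOFS =====

-- both programs' result, written as a map over the distinct keys of arr ++ lis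
def pvTarget (arr lis : List Int) : List (Int × Int) :=
  (PySem.Set.ofList (arr ++ lis) : List Int).map
    (fun k => (k, (List.count k arr : Int) * (lis.length : Int) + (List.count k lis : Int) * (arr.length : Int)))

-- A's guarded step "if present then += L else := L" is exactly an unconditional modify with default 0.
theorem pvStep_eq_modify (d : PySem.Dict Int Int) (x L : Int) :
    (if d.contains x then d.modify x 0 (fun v => v + L) else d.insert x L)
      = d.modify x 0 (fun v => v + L) := by
  by_cases h : d.contains x
  · simp [h]
  · simp only [Bool.not_eq_true] at h
    simp [h, PySem.Dict.modify, PySem.Dict.getD_of_not_contains d (0 : Int) h]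

-- A's loop: accumulating +L per occurrence adds count·L to every default-0 lookup.
theorem pvGetD_foldl_modify_add (l : List Int) (L : Int) (d : PySem.Dict Int Int) (v : Int) :
    (l.foldl (fun d x => d.modify x 0 (fun w => w + L)) d).getD v 0
      = d.getD v 0 + (l.count v : Int) * L := by
  induction l generalizing d with
  | nil => simp
  | cons a l ih =>
      simp only [List.foldl_cons, ih, PySem.Dict.getD_modify, List.count_cons]
      by_cases hv : v = a
      · simp [hv]; ring
      · simp only [hv, if_false]
        have hav : ¬ a = v := fun h => hv h.symm
        simp [hav]

theorem pvA_char (arr lis : List Int) : frequency_array arr lis = pvTarget arr lis := by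
  unfold frequency_array pvTarget
  simp only [funext fun d => funext fun x => pvStep_eq_modify d x (lis.length : Int),
             funext fun d => funext fun x => pvStep_eq_modify d x (arr.length : Int)]
  set D : PySem.Dict Int Int :=
    lis.foldl (fun d x => d.modify x 0 (fun v => v + (arr.length : Int)))
      (arr.foldl (fun d x => d.modify x 0 (fun v => v + (lis.length : Int))) PySem.Dict.empty) with hD
  have hkeys : D.keys = PySem.Set.ofList (arr ++ lis) := by
    rw [hD, PySem.Dict.keys_foldl_modify lis 0 (fun _ _ v => v + (arr.length : Int)),
        PySem.Dict.keys_foldl_modify arr 0 (fun _ _ v => v + (lis.length : Int)),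
        PySem.Dict.keys_empty, PySem.Set.update_nil_left, PySem.Set.ofList_append]
  have hnd : D.keys.Nodup := by rw [hkeys]; exact PySem.Set.nodup_ofList _
  rw [PySem.Dict.items_eq_map_keys D hnd 0, hkeys]
  refine List.map_congr_left (fun k _ => ?_)
  rw [hD, pvGetD_foldl_modify_add, pvGetD_foldl_modify_add]
  simp

-- B's second loop: inserting getD+p.2·c per pair adds the matching pairs' contributions.
theorem pvGetD_foldl_insert_pairs (pl : List (Int × Int)) (c : Int) (d : PySem.Dict Int Int) (v : Int) :
    (pl.foldl (fun d p => d.insert p.1 (d.getD p.1 0 + p.2 * c)) d).getD v 0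
      = d.getD v 0 + ((pl.filter (fun p => p.1 = v)).map (fun p => p.2 * c)).sum := by
  induction pl generalizing d with
  | nil => simp
  | cons p pl ih =>
      simp only [List.foldl_cons, ih, PySem.Dict.getD_insert, List.filter_cons]
      by_cases hv : v = p.1
      · simp [hv]; ring
      · have hpv : ¬ p.1 = v := fun h => hv h.symm
        simp [hv, hpv]

-- a Nodup list filtered for one element
theorem pvFilter_eq_of_nodup (l : List Int) (hl : l.Nodup) (v : Int) :
    l.filter (fun k => k = v) = if v ∈ l then [v] else [] := by
  induction l with
  | nil => simp
  | cons a l ih =>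
      rcases List.nodup_cons.mp hl with ⟨ha, hl'⟩
      rw [List.filter_cons]
      by_cases hv : a = v
      · subst hv
        have hnil : l.filter (fun k => k = a) = [] :=
          List.filter_eq_nil_iff.mpr (fun b hb => by
            simp only [decide_eq_true_eq]
            exact fun h => ha (h ▸ hb))
        simp [hnil]
      · have hv' : ¬ v = a := fun h => hv h.symm
        simp [hv, hv', ih hl']

-- Set.update ignores dedup of its right argument
theorem pvUpdate_ofList (s : List Int) (xs : List Int) :
    PySem.Set.update s (PySem.Set.ofList xs) = PySem.Set.update s xs := by
  rw [PySem.Set.update_eq_append_filter, PySem.Set.update_eq_append_filter, PySem.Set.ofList_ofList]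

theorem pvB_char (arr lis : List Int) : frequency_array_alt arr lis = pvTarget arr lis := by
  unfold frequency_array_alt pvTarget
  simp only [PySem.Dict.foldl_insert_getD_add_one_eq_counter]
  set F0 : PySem.Dict Int Int :=
    (PySem.Dict.counter arr).items.foldl (fun d p => d.insert p.1 (p.2 * (lis.length : Int))) PySem.Dict.empty with hF0
  have hitems0 : F0.items
      = (PySem.Set.ofList arr : List Int).map (fun k => (k, (List.count k arr : Int) * (lis.length : Int))) := by
    rw [hF0, PySem.Dict.items_foldl_insert_fresh (PySem.Dict.counter arr).items Prod.fst
          (fun p => p.2 * (lis.length : Int)) PySem.Dict.empty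
          (by intro a _; simp)
          (by simpa [PySem.Dict.keys] using PySem.Dict.nodup_keys_counter arr)]
    simp [PySem.Dict.items_counter, List.map_map, Function.comp_def, PySem.Dict.empty]
  have hkeys0 : F0.keys = (PySem.Set.ofList arr : List Int) := by
    simp [PySem.Dict.keys, hitems0, List.map_map, Function.comp_def]
  have hnd0 : F0.keys.Nodup := by rw [hkeys0]; exact PySem.Set.nodup_ofList _
  have hgetD0 : ∀ v : Int, F0.getD v 0 = (List.count v arr : Int) * (lis.length : Int) := by
    intro v
    by_cases hv : v ∈ arr
    · have hmem : (v, (List.count v arr : Int) * (lis.length : Int)) ∈ F0.items := by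
        rw [hitems0]
        exact List.mem_map.mpr ⟨v, (PySem.Set.mem_ofList arr v).mpr hv, rfl⟩
      exact PySem.Dict.getD_of_mem_items F0 hmem hnd0 0
    · have hc : F0.contains v = false := by
        rw [PySem.Dict.contains_eq_decide_mem_keys, hkeys0]
        simp [PySem.Set.mem_ofList, hv]
      rw [PySem.Dict.getD_of_not_contains F0 (0 : Int) hc, List.count_eq_zero.mpr hv]
      simp
  set F1 : PySem.Dict Int Int :=
    (PySem.Dict.counter lis).items.foldl
      (fun d p => d.insert p.1 (d.getD p.1 0 + p.2 * (arr.length : Int))) F0 with hF1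
  have hkeys1 : F1.keys = PySem.Set.ofList (arr ++ lis) := by
    rw [hF1, PySem.Dict.keys_foldl_insert_key (PySem.Dict.counter lis).items Prod.fst
          (fun d p => d.getD p.1 0 + p.2 * (arr.length : Int)) F0, hkeys0]
    have : (PySem.Dict.counter lis).items.map Prod.fst = (PySem.Set.ofList lis : List Int) := by
      simpa [PySem.Dict.keys] using PySem.Dict.keys_counter lis
    rw [this, pvUpdate_ofList, PySem.Set.ofList_append]
  have hnd1 : F1.keys.Nodup := by rw [hkeys1]; exact PySem.Set.nodup_ofList _
  have hgetD1 : ∀ v : Int,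
      F1.getD v 0 = (List.count v arr : Int) * (lis.length : Int) + (List.count v lis : Int) * (arr.length : Int) := by
    intro v
    rw [hF1, pvGetD_foldl_insert_pairs, hgetD0]
    congr 1
    rw [PySem.Dict.items_counter, List.filter_map]
    have hfil : (PySem.Set.ofList lis : List Int).filter (fun k => k = v)
        = if v ∈ (PySem.Set.ofList lis : List Int) then [v] else [] :=
      pvFilter_eq_of_nodup _ (PySem.Set.nodup_ofList _) v
    simp only [Function.comp_def]
    rw [hfil]
    by_cases hv : v ∈ lis
    · simp [(PySem.Set.mem_ofList lis v).mpr hv]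
    · have : ¬ v ∈ (PySem.Set.ofList lis : List Int) := fun h => hv ((PySem.Set.mem_ofList lis v).mp h)
      simp [this, List.count_eq_zero.mpr hv]
  rw [PySem.Dict.items_eq_map_keys F1 hnd1 0, hkeys1]
  exact List.map_congr_left (fun k _ => by rw [hgetD1 k])

-- ===== VERDICT (by name: the statement is the Claim_ definition above) =====
theorem frequency_array_spec : Claim_equal_frequency_array := by
  intro arr lis _
  unfold Spec_frequency_array
  rw [pvA_char, pvB_char]
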